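-- pv_equiv track=rewrite | github.com/YeryunJung/HW | 4/실습.py | coding_test
-- ===== SOURCE A (Python) =====
-- def coding_test(test_status):
--   cheating = []
--   # 커닝하는 사람 제거
--   for k in test_status.copy():
--     if test_status[k] == 'cheating':
--       cheating.append(k)
--       del test_status[k]
--   # 커닝하는 사람 리스트 오름차순으로 출력
--   cheating.sort()
--   # 잠자는 사람 깨우기
--   for k in test_status.copy():
--     if test_status[k] == 'sleeping':
--       test_status[k] = 'solving'
--   return (f'{cheating}\ntest_status = {test_status}')
-- ===== SOURCE B (Python) =====
-- def coding_test(test_status):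
--     # single pass splitting cheaters from survivors, hand-written merge sort for the cheater list;
--     # mutates test_status in place via clear()/update() like A does
--     def msort(xs):
--         if len(xs) <= 1:
--             return xs
--         mid = len(xs) // 2
--         left, right = msort(xs[:mid]), msort(xs[mid:])
--         out, i, j = [], 0, 0
--         while i < len(left) and j < len(right):
--             if left[i] <= right[j]:
--                 out.append(left[i]); i += 1
--             else:
--                 out.append(right[j]); j += 1
--         return out + left[i:] + right[j:]
--
--     cheating, survivors = [], []
--     for k, v in list(test_status.items()):
--         if v == 'cheating':
--             cheating.append(k)
--         else:
--             survivors.append((k, 'solving' if v == 'sleeping' else v))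
--     cheating = msort(cheating)
--     test_status.clear()
--     test_status.update(survivors)
--     return f'{cheating}\ntest_status = {test_status}'
-- ===== Notes on version B (the rewrite author's own statement) =====
-- stated objective: alternative
-- what changed: Replaces A's two mutate-while-iterating dict passes (snapshot keys, look up and delete cheaters, then snapshot again and reassign sleepers) plus list.sort with a single pass over the items that splits cheater keys from already-woken survivors into two accumulators, a hand-written top-down merge sort of the cheater keys, and a clear()/update() commit of the survivors, so the caller still sees the same in-place mutation.
import Mathlib
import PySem

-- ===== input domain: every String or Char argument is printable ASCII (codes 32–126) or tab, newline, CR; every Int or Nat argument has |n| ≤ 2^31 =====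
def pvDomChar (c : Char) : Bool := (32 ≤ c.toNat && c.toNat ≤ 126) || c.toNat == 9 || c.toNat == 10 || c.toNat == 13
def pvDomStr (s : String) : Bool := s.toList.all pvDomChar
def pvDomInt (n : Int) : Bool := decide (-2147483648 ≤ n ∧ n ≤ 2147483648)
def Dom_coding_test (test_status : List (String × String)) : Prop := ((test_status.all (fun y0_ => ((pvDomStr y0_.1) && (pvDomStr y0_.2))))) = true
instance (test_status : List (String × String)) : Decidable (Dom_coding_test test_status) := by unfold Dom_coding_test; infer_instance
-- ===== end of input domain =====

-- B makes a single pass that splits cheaters from survivors (no dict deletion/reassignment) and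
-- sorts the cheater keys with a hand-written merge sort instead of list.sort; equivalence is about
-- the RETURN value only (both Pythons mutate test_status in place to the same final dict).

-- ===== PORT A =====
-- Python repr of a str, hand-ported (exact on the Dom charset: printable ASCII plus tab/newline/CR);
-- quote choice and escapes follow CPython: single quotes unless the string has ' and no ".
def pyEscChar (q c : Char) : List Char :=
  if c == '\\' then ['\\', '\\']
  else if c == q then ['\\', q]
  else if c == Char.ofNat 9 then ['\\', 't']
  else if c == Char.ofNat 10 then ['\\', 'n']
  else if c == Char.ofNat 13 then ['\\', 'r']
  else [c]

def pyStrRepr (s : String) : String :=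
  let cs := s.toList
  let q : Char := if cs.contains '\'' && !cs.contains '"' then '"' else '\''
  String.ofList (q :: cs.flatMap (pyEscChar q) ++ [q])

-- f'{cheating}' : Python repr of a list of str
def pyStrListRepr (xs : List String) : String :=
  "[" ++ PySem.Str.join ", " (xs.map pyStrRepr) ++ "]"

-- f'{test_status}' : Python repr of a dict of str to str, rendered from its items in order
def pyStrDictRepr (kvs : List (String × String)) : String :=
  "{" ++ PySem.Str.join ", " (kvs.map (fun kv => pyStrRepr kv.1 ++ ": " ++ pyStrRepr kv.2)) ++ "}"

-- Port of A. The parameter (a dict) arrives as an association list; the dict Python sees is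
-- PySem.Dict.ofList of it. `for k in test_status.copy()` iterates the keys of a snapshot;
-- test_status[k] is written getD k "" — exact here, since every key looked up is present.
def coding_test (test_status : List (String × String)) : String :=
  let d0 := PySem.Dict.ofList test_status
  let st1 := d0.keys.foldl
    (fun (st : List String × PySem.Dict String String) k =>
      if st.2.getD k "" == "cheating" then (st.1 ++ [k], st.2.erase k) else st)
    ([], d0)
  let cheating := PySem.List.sorted st1.1 (fun x => x) false
  let d1 := st1.2
  let d2 := d1.keys.foldl
    (fun d k => if d.getD k "" == "sleeping" then d.insert k "solving" else d) d1
  pyStrListRepr cheating ++ "\ntest_status = " ++ pyStrDictRepr d2.items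

-- ===== PORT B =====
-- Port of B's inner `while i < len(left) and j < len(right)` merge loop: the indices i, j advance
-- through left and right, which is the structural recursion on the two remaining suffixes;
-- `out + left[i:] + right[j:]` is the accumulated result.
def pvMergeLoop : List String → List String → List String
  | [], right => right
  | left, [] => left
  | a :: left, b :: right =>
      if a ≤ b then a :: pvMergeLoop left (b :: right)
      else b :: pvMergeLoop (a :: left) right

-- Port of B's msort: xs[:mid] / xs[mid:] with mid = len(xs)//2 ≥ 0 are take/drop (exact here).
def pvMsort (xs : List String) : List String :=
  if h : xs.length ≤ 1 then xs
  else
    let mid := xs.length / 2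
    pvMergeLoop (pvMsort (xs.take mid)) (pvMsort (xs.drop mid))
termination_by xs.length
decreasing_by
  · simp only [List.length_take]; omega
  · simp only [List.length_drop]; omega

-- Port of B: one pass over the items splitting cheaters from survivors, then merge sort.
def coding_test_alt (test_status : List (String × String)) : String :=
  let d := PySem.Dict.ofList test_status
  let st := d.items.foldl
    (fun (st : List String × List (String × String)) kv =>
      if kv.2 == "cheating" then (st.1 ++ [kv.1], st.2)
      else (st.1, st.2 ++ [(kv.1, if kv.2 == "sleeping" then "solving" else kv.2)]))
    ([], [])
  let cheating := pvMsort st.1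
  pyStrListRepr cheating ++ "\ntest_status = " ++ pyStrDictRepr st.2

-- ===== PRECONDITION & SPEC =====
def Spec_coding_test (test_status : List (String × String)) (out : String) : Prop := out = coding_test_alt test_status
instance (test_status : List (String × String)) (out : String) : Decidable (Spec_coding_test test_status out) := by unfold Spec_coding_test; infer_instance

-- ===== CLAIM (what is proved, stated in full; the proofs are below) =====
def Claim_equal_coding_test : Prop := ∀ (test_status : List (String × String)), Dom_coding_test test_status → Spec_coding_test test_status (coding_test test_status)

-- ===== LEMMAS AND PROOFS =====

-- First lookup in an association dict whose earlier entries have other keys.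
theorem pvGetD_mk_append (pre t : List (String × String)) (k v d : String)
    (h : ∀ p ∈ pre, p.1 ≠ k) :
    (PySem.Dict.mk (pre ++ (k, v) :: t)).getD k d = v := by
  induction pre with
  | nil => simp [PySem.Dict.getD, PySem.Dict.get?]
  | cons p ps ih =>
      have hp : p.1 ≠ k := h p (by simp)
      simpa [PySem.Dict.getD, PySem.Dict.get?, List.find?, hp] using
        ih (fun q hq => h q (by simp [hq]))

-- The key facts both of A's loop inductions need about the head entry (k, v).
theorem pvKeyFacts (pre t : List (String × String)) (k v : String)
    (hnd : ((pre ++ (k, v) :: t).map (fun kv => kv.1)).Nodup) :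
    (∀ p ∈ pre, p.1 ≠ k) ∧ k ∉ t.map (fun kv => kv.1) ∧
      ((pre ++ t).map (fun kv => kv.1)).Nodup ∧
      (∀ w : String, ((pre ++ (k, w) :: t).map (fun kv : String × String => kv.1)).Nodup) := by
  have hsh : ((pre ++ (k, v) :: t).map (fun kv => kv.1))
      = pre.map (fun kv => kv.1) ++ k :: t.map (fun kv => kv.1) := by simp
  rw [hsh, List.nodup_middle] at hnd
  obtain ⟨hk, hrest⟩ := List.nodup_cons.mp hnd
  refine ⟨?_, ?_, ?_, ?_⟩
  · intro p hp hEq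
    exact hk (by rw [← hEq]; exact List.mem_append_left _ (List.mem_map_of_mem hp))
  · intro hmem; exact hk (List.mem_append_right _ hmem)
  · simpa using hrest
  · intro w
    have : ((pre ++ (k, w) :: t).map (fun kv : String × String => kv.1))
        = pre.map (fun kv => kv.1) ++ k :: t.map (fun kv => kv.1) := by simp
    rw [this, List.nodup_middle]; exact List.nodup_cons.mpr ⟨hk, hrest⟩

-- A's first loop: deleting the cheaters while collecting their keys equals one filter pass.
theorem pvLoop1 (t pre : List (String × String)) (ch : List String)
    (hnd : ((pre ++ t).map (fun kv => kv.1)).Nodup) :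
    (t.map (fun kv => kv.1)).foldl
      (fun (st : List String × PySem.Dict String String) k =>
        if st.2.getD k "" == "cheating" then (st.1 ++ [k], st.2.erase k) else st)
      (ch, PySem.Dict.mk (pre ++ t))
    = (ch ++ (t.filter (fun kv => kv.2 == "cheating")).map (fun kv => kv.1),
       PySem.Dict.mk (pre ++ t.filter (fun kv => kv.2 != "cheating"))) := by
  induction t generalizing pre ch with
  | nil => simp
  | cons kv t ih =>
      obtain ⟨k, v⟩ := kv
      obtain ⟨hpre, ht, hnd', _⟩ := pvKeyFacts pre t k v hnd
      have hget := pvGetD_mk_append pre t k v "" hpre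
      by_cases hv : v = "cheating"
      · subst hv
        have herase :
            (PySem.Dict.mk (pre ++ (k, "cheating") :: t)).erase k = PySem.Dict.mk (pre ++ t) := by
          simp only [PySem.Dict.erase, List.filter_append, List.filter_cons]
          have h1 : pre.filter (fun p => !p.1 == k) = pre :=
            List.filter_eq_self.mpr (fun p hp => by simpa using hpre p hp)
          have h2 : t.filter (fun p => !p.1 == k) = t :=
            List.filter_eq_self.mpr (fun p hp => by
              have hne : p.1 ≠ k := fun hEq => ht (hEq ▸ List.mem_map_of_mem hp)
              simpa using hne)
          simp [h1, h2]
        simp only [List.map_cons, List.foldl_cons, hget]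
        rw [if_pos (by simp), herase, ih pre (ch ++ [k]) hnd']
        simp [List.append_assoc]
      · have hvb : (v == "cheating") = false := by simpa using hv
        simp only [List.map_cons, List.foldl_cons, hget]
        rw [if_neg (by simp [hv])]
        have hnd'' : ((pre ++ [(k, v)] ++ t).map (fun kv => kv.1)).Nodup := by
          simpa [List.append_assoc] using hnd
        have := ih (pre ++ [(k, v)]) ch hnd''
        simp only [List.append_assoc, List.cons_append, List.nil_append] at this
        rw [this]
        simp [hvb, hv]

-- A's second loop: waking the sleepers key by key equals one map pass.
theorem pvLoop2 (t pre : List (String × String))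
    (hnd : ((pre ++ t).map (fun kv => kv.1)).Nodup) :
    (t.map (fun kv => kv.1)).foldl
      (fun d k => if d.getD k "" == "sleeping" then d.insert k "solving" else d)
      (PySem.Dict.mk (pre ++ t))
    = PySem.Dict.mk (pre ++ t.map (fun kv => (kv.1, if kv.2 == "sleeping" then "solving" else kv.2))) := by
  induction t generalizing pre with
  | nil => simp
  | cons kv t ih =>
      obtain ⟨k, v⟩ := kv
      obtain ⟨hpre, ht, _, hndw⟩ := pvKeyFacts pre t k v hnd
      have hget := pvGetD_mk_append pre t k v "" hpre
      by_cases hv : v = "sleeping"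
      · subst hv
        have hins : (PySem.Dict.mk (pre ++ (k, "sleeping") :: t)).insert k "solving"
            = PySem.Dict.mk (pre ++ (k, "solving") :: t) := by
          have hc : (PySem.Dict.mk (pre ++ (k, "sleeping") :: t)).contains k = true := by
            simp [PySem.Dict.contains]
          simp only [PySem.Dict.insert, hc, if_pos, List.map_append, List.map_cons]
          have h1 : pre.map (fun p => if (p.1 == k) = true then (k, "solving") else p) = pre :=
            (List.map_congr_left (fun p hp =>
              show _ = id p by simp [hpre p hp])).trans (List.map_id pre)
          have h2 : t.map (fun p => if (p.1 == k) = true then (k, "solving") else p) = t :=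
            (List.map_congr_left (fun p hp =>
              show _ = id p by
                have hne : p.1 ≠ k := fun hEq => ht (hEq ▸ List.mem_map_of_mem hp)
                simp [hne])).trans (List.map_id t)
          rw [h1, h2]; simp
        simp only [List.map_cons, List.foldl_cons, hget]
        rw [if_pos (by simp), hins]
        have := ih (pre ++ [(k, "solving")]) (by simpa [List.append_assoc] using hndw "solving")
        simp only [List.append_assoc, List.cons_append, List.nil_append] at this
        rw [this]
        simp
      · have hvb : (v == "sleeping") = false := by simpa using hv
        simp only [List.map_cons, List.foldl_cons, hget]
        rw [if_neg (by simp [hv])]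
        have := ih (pre ++ [(k, v)]) (by simpa [List.append_assoc] using hndw v)
        simp only [List.append_assoc, List.cons_append, List.nil_append] at this
        rw [this]
        simp [hvb]

-- B's splitting pass equals a filter+map for each component.
theorem pvSplit (t : List (String × String)) (ch : List String) (sv : List (String × String)) :
    t.foldl
      (fun (st : List String × List (String × String)) kv =>
        if kv.2 == "cheating" then (st.1 ++ [kv.1], st.2)
        else (st.1, st.2 ++ [(kv.1, if kv.2 == "sleeping" then "solving" else kv.2)]))
      (ch, sv)
    = (ch ++ (t.filter (fun kv => kv.2 == "cheating")).map (fun kv => kv.1),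
       sv ++ (t.filter (fun kv => kv.2 != "cheating")).map
         (fun kv => (kv.1, if kv.2 == "sleeping" then "solving" else kv.2))) := by
  induction t generalizing ch sv with
  | nil => simp
  | cons kv t ih =>
      obtain ⟨k, v⟩ := kv
      by_cases hv : v = "cheating"
      · subst hv
        simp only [List.foldl_cons]
        rw [if_pos (by simp), ih]
        simp
      · have hvb : (v == "cheating") = false := by simpa using hv
        simp only [List.foldl_cons]
        rw [if_neg (by simp [hv]), ih]
        simp [hvb, hv]

-- The merge loop permutes the concatenation of its two inputs.
theorem pvMergeLoop_perm (l r : List String) : (pvMergeLoop l r).Perm (l ++ r) := by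
  induction l generalizing r with
  | nil => simp [pvMergeLoop]
  | cons a l ih =>
      induction r with
      | nil => simp [pvMergeLoop]
      | cons b r ihr =>
          rw [pvMergeLoop]
          split_ifs with hab
          · exact (ih (b :: r)).cons a
          · exact ((ihr.cons b).trans (List.perm_middle.symm))

theorem pvMergeLoop_mem {x : String} {l r : List String} (h : x ∈ pvMergeLoop l r) :
    x ∈ l ∨ x ∈ r := by
  have := (pvMergeLoop_perm l r).mem_iff.mp h
  simpa using this

-- The merge loop merges two sorted lists into a sorted list.
theorem pvMergeLoop_pairwise (l r : List String)
    (hl : l.Pairwise (· ≤ ·)) (hr : r.Pairwise (· ≤ ·)) :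
    (pvMergeLoop l r).Pairwise (· ≤ ·) := by
  induction l generalizing r with
  | nil => simpa [pvMergeLoop] using hr
  | cons a l ih =>
      induction r with
      | nil => simpa [pvMergeLoop] using hl
      | cons b r ihr =>
          obtain ⟨ha, hl'⟩ := List.pairwise_cons.mp hl
          obtain ⟨hb, hr'⟩ := List.pairwise_cons.mp hr
          rw [pvMergeLoop]
          split_ifs with hab
          · refine List.pairwise_cons.mpr ⟨?_, ih (b :: r) hl' hr⟩
            intro x hx
            rcases pvMergeLoop_mem hx with hxl | hxr
            · exact ha x hxl
            · rcases List.mem_cons.mp hxr with rfl | hxr'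
              · exact hab
              · exact le_trans hab (hb x hxr')
          · have hba : b ≤ a := Std.le_of_not_ge hab
            refine List.pairwise_cons.mpr ⟨?_, ihr hr'⟩
            intro x hx
            rcases pvMergeLoop_mem hx with hxl | hxr
            · rcases List.mem_cons.mp hxl with rfl | hxl'
              · exact hba
              · exact le_trans hba (ha x hxl')
            · exact hb x hxr

theorem pvMsort_perm (xs : List String) : (pvMsort xs).Perm xs := by
  rw [pvMsort]
  split_ifs with h
  · exact List.Perm.refl xs
  · have hl := pvMsort_perm (xs.take (xs.length / 2))
    have hr := pvMsort_perm (xs.drop (xs.length / 2))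
    have := (pvMergeLoop_perm (pvMsort (xs.take (xs.length / 2)))
      (pvMsort (xs.drop (xs.length / 2)))).trans (hl.append hr)
    simpa [List.take_append_drop] using this
termination_by xs.length
decreasing_by
  · simp only [List.length_take]; omega
  · simp only [List.length_drop]; omega

theorem pvMsort_pairwise (xs : List String) : (pvMsort xs).Pairwise (· ≤ ·) := by
  rw [pvMsort]
  split_ifs with h
  · interval_cases h' : xs.length
    · simp_all [List.length_eq_zero_iff.mp h']
    · obtain ⟨a, rfl⟩ := List.length_eq_one_iff.mp h'
      simp
  · have hl := pvMsort_pairwise (xs.take (xs.length / 2))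
    have hr := pvMsort_pairwise (xs.drop (xs.length / 2))
    exact pvMergeLoop_pairwise _ _ hl hr
termination_by xs.length
decreasing_by
  · simp only [List.length_take]; omega
  · simp only [List.length_drop]; omega

-- On a duplicate-free list, B's merge sort IS Python's sorted (strictly increasing rearrangement).
theorem pvMsort_eq_sorted (xs : List String) (hnd : xs.Nodup) :
    PySem.List.sorted xs (fun x => x) false = pvMsort xs := by
  have hperm := pvMsort_perm xs
  have hnd' : (pvMsort xs).Nodup := hperm.nodup_iff.mpr hnd
  exact PySem.List.sorted_eq_of_perm_of_pairwise_lt xs (pvMsort xs) (fun x => x) hperm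
    (List.Pairwise.imp₂ (fun a b hle hne => lt_of_le_of_ne hle hne) (pvMsort_pairwise xs) hnd')

-- ===== VERDICT (by name: the statement is the Claim_ definition above) =====
theorem coding_test_spec : Claim_equal_coding_test := by
  intro ts _
  unfold Spec_coding_test coding_test coding_test_alt
  have hnd : (((PySem.Dict.ofList ts).items.map (fun kv => kv.1))).Nodup := by
    simpa [PySem.Dict.keys] using PySem.Dict.nodup_keys_ofList (κ := String) (ν := String) ts
  have h1 := pvLoop1 (PySem.Dict.ofList ts).items [] [] (by simpa using hnd)
  have hndf : (((PySem.Dict.ofList ts).items.filter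
      (fun kv => kv.2 != "cheating")).map (fun kv => kv.1)).Nodup :=
    hnd.sublist (List.Sublist.map _ List.filter_sublist)
  have h2 := pvLoop2 ((PySem.Dict.ofList ts).items.filter (fun kv => kv.2 != "cheating")) []
    (by simpa using hndf)
  have h3 := pvSplit (PySem.Dict.ofList ts).items [] []
  have hndc : (((PySem.Dict.ofList ts).items.filter
      (fun kv => kv.2 == "cheating")).map (fun kv => kv.1)).Nodup :=
    hnd.sublist (List.Sublist.map _ List.filter_sublist)
  simp only [List.nil_append] at h1 h2 h3
  simp only [PySem.Dict.keys, h1, h2, h3, pvMsort_eq_sorted _ hndc]
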